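-- pv_equiv track=rewrite | github.com/rubenomontero/guessing-fibonacci | fibonacci.py | find_closest_fibonacci
-- ===== SOURCE A (Python) =====
-- def generate_fibonacci_up_to(limit):
--     """Generate Fibonacci numbers up to a given limit."""
--     fib_sequence = [0, 1]
--     while fib_sequence[-1] < limit:
--         fib_sequence.append(fib_sequence[-1] + fib_sequence[-2])
--     return fib_sequence
--
-- def find_closest_fibonacci(number):
--     """Find the closest Fibonacci number to the given number."""
--     fib_sequence = generate_fibonacci_up_to(abs(number) * 2 + 100)
--     closest = fib_sequence[0]
--     closest_index = 0
--
--     for i, fib in enumerate(fib_sequence):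
--         if abs(fib - abs(number)) < abs(closest - abs(number)):
--             closest = fib
--             closest_index = i
--
--     # Get the two numbers that form this Fibonacci number
--     if closest_index >= 2:
--         prev1 = fib_sequence[closest_index - 1]
--         prev2 = fib_sequence[closest_index - 2]
--     elif closest_index == 1:
--         prev1 = fib_sequence[0]
--         prev2 = 0
--     else:
--         prev1 = 0
--         prev2 = 0
--
--     return closest, prev2, prev1
-- ===== SOURCE B (Python) =====
-- def find_closest_fibonacci(number):
--     """Find the closest Fibonacci number to the given number."""
--     target = abs(number)
--     limit = target * 2 + 100
--     pp = p = 0          # the two values preceding `value` in the sequence (0-padded)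
--     value, nxt = 0, 1
--     best_v, best_pp, best_p = 0, 0, 0
--     while True:
--         if abs(value - target) < abs(best_v - target):
--             best_v, best_pp, best_p = value, pp, p
--         if value >= limit:
--             return best_v, best_pp, best_p
--         pp, p = p, value
--         value, nxt = nxt, value + nxt
-- ===== Notes on version B (the rewrite author's own statement) =====
-- stated objective: simpler
-- what changed: Replaces the build-a-list-then-scan-then-index pipeline by a single streaming loop that generates Fibonacci numbers in O(1) space, tracking the best value together with its two rolling predecessors, so no list and no index bookkeeping exist at all.
import Mathlib
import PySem

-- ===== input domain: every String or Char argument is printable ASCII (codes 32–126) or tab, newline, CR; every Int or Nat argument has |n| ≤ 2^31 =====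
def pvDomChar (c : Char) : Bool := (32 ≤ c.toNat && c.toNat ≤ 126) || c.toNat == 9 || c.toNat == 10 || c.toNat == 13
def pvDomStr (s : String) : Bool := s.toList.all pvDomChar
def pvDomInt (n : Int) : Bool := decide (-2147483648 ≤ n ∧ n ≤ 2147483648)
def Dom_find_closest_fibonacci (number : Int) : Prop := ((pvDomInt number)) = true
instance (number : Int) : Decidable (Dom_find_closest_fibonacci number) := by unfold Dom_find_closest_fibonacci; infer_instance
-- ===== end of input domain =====

-- B replaces A's build-list / scan-with-index / index-back pipeline by one streaming loop
-- holding only the current value, its two rolling predecessors and the best triple (simpler, O(1) space).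

-- ===== PORT A =====
-- while fib_sequence[-1] < limit: append.  The list is acc, fib_sequence[-1] = p, fib_sequence[-2] = pp.
-- fuel is only a totality guard: the loop leaves p < limit after at most (2*limit).toNat rounds
-- (p + pp grows by at least 1 each round), so the 0 case is never reached from the wrapper below.
def pvGenAux (fuel : Nat) (limit pp p : Int) (acc : List Int) : List Int :=
  match fuel with
  | 0 => acc
  | f + 1 => if p < limit then pvGenAux f limit p (p + pp) (acc ++ [p + pp]) else acc

def generate_fibonacci_up_to (limit : Int) : List Int :=
  pvGenAux (2 * limit).toNat limit 0 1 [0, 1]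

-- for i, fib in enumerate(fib_sequence): strict-< update of (closest, closest_index)
def pvALoop (t : Int) (fibs : List Int) (i closest ci : Int) : Int × Int :=
  match fibs with
  | [] => (closest, ci)
  | f :: rest =>
      if |f - t| < |closest - t| then pvALoop t rest (i + 1) f i
      else pvALoop t rest (i + 1) closest ci

-- the trailing if/elif/else that recovers prev1/prev2 from the list
-- (the pyGet? indices are always in range here, so .getD 0 is never the IndexError case)
def pvAPost (fib : List Int) (closest ci : Int) : Int × Int × Int :=
  if ci ≥ 2 then
    (closest, (PySem.List.pyGet? fib (ci - 2)).getD 0, (PySem.List.pyGet? fib (ci - 1)).getD 0)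
  else if ci = 1 then
    (closest, 0, (PySem.List.pyGet? fib 0).getD 0)
  else
    (closest, 0, 0)

def find_closest_fibonacci (number : Int) : Int × Int × Int :=
  let fib := generate_fibonacci_up_to (|number| * 2 + 100)
  let st := pvALoop |number| fib 0 ((PySem.List.pyGet? fib 0).getD 0) 0
  pvAPost fib st.1 st.2

-- ===== PORT B =====
-- one streaming loop: process `value`, roll (pp, p), advance (value, nxt).
-- fuel is only a totality guard (same bound as A's loop plus the extra seed step);
-- the 0 case is never reached from the wrapper below.
def pvAltLoop (fuel : Nat) (t limit pp p value nxt : Int) (best : Int × Int × Int) :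
    Int × Int × Int :=
  let best' := if |value - t| < |best.1 - t| then (value, pp, p) else best
  match fuel with
  | 0 => best'
  | f + 1 =>
      if value < limit then pvAltLoop f t limit p value nxt (value + nxt) best' else best'

def find_closest_fibonacci_alt (number : Int) : Int × Int × Int :=
  pvAltLoop ((2 * (|number| * 2 + 100)).toNat + 1) |number| (|number| * 2 + 100) 0 0 0 1 (0, 0, 0)

-- ===== PRECONDITION & SPEC =====
def Spec_find_closest_fibonacci (number : Int) (out : Int × Int × Int) : Prop := out = find_closest_fibonacci_alt number
instance (number : Int) (out : Int × Int × Int) : Decidable (Spec_find_closest_fibonacci number out) := by unfold Spec_find_closest_fibonacci; infer_instance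

-- ===== CLAIM (what is proved, stated in full; the proofs are below) =====
def Claim_equal_find_closest_fibonacci : Prop := ∀ (number : Int), Dom_find_closest_fibonacci number → Spec_find_closest_fibonacci number (find_closest_fibonacci number)

-- ===== LEMMAS AND PROOFS =====

-- common reference computation: fold over the explicit value list with rolling predecessors
def pvScan (t : Int) : List Int → Int × Int → Int × Int × Int → Int × Int × Int
  | [], _, best => best
  | v :: rest, (pp, p), best =>
      pvScan t rest (p, v) (if |v - t| < |best.1 - t| then (v, pp, p) else best)

-- the stream of values B's loop processes, starting at (value, nxt), with the same fuel shape
def pvBs (fuel : Nat) (limit value nxt : Int) : List Int :=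
  value :: (match fuel with
    | 0 => []
    | f + 1 => if value < limit then pvBs f limit nxt (value + nxt) else [])

-- 0-padded list access at a possibly negative position
def pvPad (L : List Int) (j : Int) : Int := if j < 0 then 0 else L.getD j.toNat 0

-- B's loop is the rolling-predecessor fold over its value stream
theorem pvAltLoop_eq_scan (fuel : Nat) :
    ∀ (t limit pp p value nxt : Int) (best : Int × Int × Int),
      pvAltLoop fuel t limit pp p value nxt best
        = pvScan t (pvBs fuel limit value nxt) (pp, p) best := by
  induction fuel with
  | zero =>
      intro t limit pp p value nxt best
      rw [pvAltLoop, pvBs]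
      rw [pvScan, pvScan]
  | succ f ih =>
      intro t limit pp p value nxt best
      rw [pvAltLoop, pvBs, pvScan]
      by_cases h : value < limit
      · rw [if_pos h, if_pos h, ih]
      · rw [if_neg h, if_neg h, pvScan]

-- appending to the accumulator commutes with the generator loop
theorem pvGenAux_append (fuel : Nat) :
    ∀ (limit pp p : Int) (acc1 acc2 : List Int),
      pvGenAux fuel limit pp p (acc1 ++ acc2)
        = acc1 ++ pvGenAux fuel limit pp p acc2 := by
  induction fuel with
  | zero => intro limit pp p acc1 acc2; rw [pvGenAux, pvGenAux]
  | succ f ih =>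
      intro limit pp p acc1 acc2
      rw [pvGenAux, pvGenAux]
      by_cases h : p < limit
      · rw [if_pos h, if_pos h, List.append_assoc, ih]
      · rw [if_neg h, if_neg h]

-- B's stream from (p, nxt) with nxt = p + pp is p followed by A's generated tail from (pp, p)
theorem pvBs_eq_gen (fuel : Nat) :
    ∀ (limit pp p nxt : Int), nxt = p + pp →
      pvBs fuel limit p nxt = p :: pvGenAux fuel limit pp p [] := by
  induction fuel with
  | zero => intro limit pp p nxt _; rw [pvBs, pvGenAux]
  | succ f ih =>
      intro limit pp p nxt hnxt
      subst hnxt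
      rw [pvBs, pvGenAux]
      by_cases h : p < limit
      · rw [if_pos h, if_pos h,
            ih limit p (p + pp) (p + (p + pp)) (by ring),
            show ([] : List Int) ++ [p + pp] = [p + pp] ++ [] from by simp,
            pvGenAux_append]
        simp
      · rw [if_neg h, if_neg h]

-- the A-side invariant: running A's indexed scan from position i and then indexing back
-- into L equals the rolling-predecessor fold over the remaining suffix
theorem pvInv (t : Int) (L : List Int) (S : List Int) :
    ∀ (i ci c : Int), S = L.drop i.toNat → 0 ≤ i → i ≤ L.length → 0 ≤ ci → ci < i →
      c = L.getD ci.toNat 0 →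
      pvAPost L (pvALoop t S i c ci).1 (pvALoop t S i c ci).2
        = pvScan t S (pvPad L (i - 2), pvPad L (i - 1)) (c, pvPad L (ci - 2), pvPad L (ci - 1)) := by
  induction S with
  | nil =>
      intro i ci c hS h0i hiL h0ci hci hc
      have hlen : (L.length : Int) ≤ i := by
        have := List.drop_eq_nil_iff.mp hS.symm
        omega
      have hciL : ci.toNat < L.length := by omega
      simp only [pvALoop, pvScan, pvAPost]
      by_cases h2 : ci ≥ 2
      · rw [if_pos h2,
            PySem.List.pyGet?_eq_some_getElem L (i := ci - 2) (by omega) (by omega),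
            PySem.List.pyGet?_eq_some_getElem L (i := ci - 1) (by omega) (by omega)]
        simp only [Option.getD_some, pvPad]
        rw [if_neg (by omega : ¬ ci - 2 < 0), if_neg (by omega : ¬ ci - 1 < 0),
            List.getD_eq_getElem _ _ (by omega), List.getD_eq_getElem _ _ (by omega)]
      · rw [if_neg h2]
        by_cases hone : ci = 1
        · subst hone
          rw [if_pos rfl, PySem.List.pyGet?_eq_some_getElem L (i := 0) (by omega) (by omega)]
          simp only [Option.getD_some, pvPad]
          norm_num
          simp [List.getElem?_eq_getElem (show 0 < L.length by omega)]
        · have h0 : ci = 0 := by omega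
          subst h0
          rw [if_neg hone]
          simp [pvPad]
  | cons v rest ih =>
      intro i ci c hS h0i hiL h0ci hci hc
      have hlen : i.toNat < L.length := by
        by_contra hcon
        rw [List.drop_eq_nil_of_le (by omega)] at hS
        exact absurd hS (List.cons_ne_nil v rest)
      have hdrop := (List.getElem_cons_drop (as := L) (i := i.toNat) hlen)
      rw [← hdrop] at hS
      obtain ⟨hv, hrest⟩ : v = L[i.toNat] ∧ rest = L.drop (i.toNat + 1) := by
        injection hS with a b; exact ⟨a, b⟩
      have hvpad : pvPad L i = v := by
        rw [pvPad, if_neg (by omega), List.getD_eq_getElem _ _ (by omega), hv]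
      simp only [pvALoop, pvScan]
      by_cases hcond : |v - t| < |c - t|
      · rw [if_pos hcond, if_pos hcond]
        rw [ih (i + 1) i v (by rw [hrest]; congr 1; omega) (by omega) (by omega) (by omega)
              (by omega) (by rw [List.getD_eq_getElem _ _ (by omega), hv])]
        have e1 : i + 1 - 2 = i - 1 := by ring
        have e2 : i + 1 - 1 = i := by ring
        rw [e1, e2, hvpad]
      · rw [if_neg hcond, if_neg hcond]
        rw [ih (i + 1) ci c (by rw [hrest]; congr 1; omega) (by omega) (by omega) (by omega)
              (by omega) hc]
        have e1 : i + 1 - 2 = i - 1 := by ring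
        have e2 : i + 1 - 1 = i := by ring
        rw [e1, e2, hvpad]

-- ===== VERDICT (by name: the statement is the Claim_ definition above) =====
theorem find_closest_fibonacci_spec : Claim_equal_find_closest_fibonacci := by
  intro number _
  unfold Spec_find_closest_fibonacci find_closest_fibonacci find_closest_fibonacci_alt
  have hlim : (0 : Int) < |number| * 2 + 100 := by positivity
  -- the generated list is 0 :: 1 :: G
  have hfib : generate_fibonacci_up_to (|number| * 2 + 100)
      = 0 :: 1 :: pvGenAux (2 * (|number| * 2 + 100)).toNat (|number| * 2 + 100) 0 1 [] := by
    rw [generate_fibonacci_up_to,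
        show ([0, 1] : List Int) = [0, 1] ++ [] from by simp, pvGenAux_append]
    rfl
  -- B's stream is the same list
  rw [pvAltLoop_eq_scan, pvBs, if_pos hlim,
      pvBs_eq_gen _ _ 0 1 (0 + 1) (by ring), hfib]
  set L := 0 :: 1 :: pvGenAux (2 * (|number| * 2 + 100)).toNat (|number| * 2 + 100) 0 1 []
    with hL
  -- A's initial closest is L[0] = 0, and index 0 never updates the best (strict <)
  have h0 : (PySem.List.pyGet? L 0).getD 0 = 0 := by rw [hL, PySem.List.pyGet?_zero_cons]; rfl
  simp only [h0]
  have hA0 : pvALoop |number| L 0 0 0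
      = pvALoop |number| (1 :: pvGenAux (2 * (|number| * 2 + 100)).toNat (|number| * 2 + 100) 0 1 [])
          (0 + 1) 0 0 := by
    rw [hL]
    simp [pvALoop]
  rw [hA0]
  rw [pvInv |number| L _ (0 + 1) 0 0 (by rw [hL]; rfl) (by norm_num) (by rw [hL]; simp; omega)
        (by norm_num) (by norm_num) (by rw [hL]; rfl)]
  -- B's first step (value 0) also leaves best unchanged
  have hB0 : pvScan |number| L (0, 0) (0, 0, 0)
      = pvScan |number| (1 :: pvGenAux (2 * (|number| * 2 + 100)).toNat (|number| * 2 + 100) 0 1 [])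
          (0, 0) (0, 0, 0) := by
    rw [hL]
    simp [pvScan]
  rw [hB0]
  have hp0 : pvPad L (0 + 1 - 2) = 0 := by rw [pvPad]; norm_num
  have hp1 : pvPad L (0 + 1 - 1) = 0 := by rw [pvPad, hL]; norm_num
  have hp2 : pvPad L ((0 : Int) - 2) = 0 := by rw [pvPad]; norm_num
  have hp3 : pvPad L ((0 : Int) - 1) = 0 := by rw [pvPad]; norm_num
  rw [hp0, hp1, hp2, hp3]
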